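-- pv_equiv track=rewrite | github.com/pcf1040-1/PAT | src/parse.py | rhymes
-- ===== SOURCE A (Python) =====
-- rhyme_requirement = 2
--
-- def rhymes(parts_one : list, parts_two: list):
--     first_len = len(parts_one)
--     second_len = len(parts_two)
--     first_parts = parts_one.copy()
--     second_parts = parts_two.copy()
--     first_parts.reverse(), second_parts.reverse()
--
--     rhyme_count = 0
--
--     for i in range(min(first_len, second_len)):
--         if(first_parts[i] == second_parts[i]):
--             rhyme_count += 1
--         else:
--             break
--
--     if(rhyme_count >= rhyme_requirement):
--         return True
--     return False
-- ===== SOURCE B (Python) =====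
-- def rhymes(parts_one: list, parts_two: list):
--     return (len(parts_one) >= 2 and len(parts_two) >= 2
--             and parts_one[-1] == parts_two[-1]
--             and parts_one[-2] == parts_two[-2])
-- ===== Notes on version B (the rewrite author's own statement) =====
-- stated objective: simpler
-- what changed: Replaced the copy/reverse/counting loop with a single closed-form boolean: the loop breaks on the first mismatch from the end, so the count reaches 2 exactly when both lists have length >= 2 and their last two elements match.
import Mathlib
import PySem

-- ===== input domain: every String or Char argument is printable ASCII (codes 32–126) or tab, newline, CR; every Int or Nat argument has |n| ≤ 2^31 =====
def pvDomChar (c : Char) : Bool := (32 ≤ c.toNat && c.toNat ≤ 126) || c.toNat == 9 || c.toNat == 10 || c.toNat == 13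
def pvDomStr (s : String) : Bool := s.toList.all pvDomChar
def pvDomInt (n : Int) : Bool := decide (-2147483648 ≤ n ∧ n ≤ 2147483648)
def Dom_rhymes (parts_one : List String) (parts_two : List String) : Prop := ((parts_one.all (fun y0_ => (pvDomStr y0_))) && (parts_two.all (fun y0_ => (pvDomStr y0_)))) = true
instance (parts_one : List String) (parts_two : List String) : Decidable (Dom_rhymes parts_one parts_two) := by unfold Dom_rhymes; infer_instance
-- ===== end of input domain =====

-- B replaces A's copy/reverse/counting loop by a closed-form boolean on the last two elements (objective: simpler).

-- ===== PORT A =====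
-- the for-loop over range(min(first_len, second_len)) with its early break;
-- the `_, _ => rc` arm is the IndexError case, unreachable since every index is in range
def rhymesLoop (fp sp : List String) : List Int → Nat → Nat
  | [], rc => rc
  | i :: rest, rc =>
    match PySem.List.pyGet? fp i, PySem.List.pyGet? sp i with
    | some a, some b => if a = b then rhymesLoop fp sp rest (rc + 1) else rc
    | _, _ => rc

def rhymes (parts_one : List String) (parts_two : List String) : Bool :=
  let first_len := parts_one.length
  let second_len := parts_two.length
  let first_parts := parts_one.reverse
  let second_parts := parts_two.reverse
  let rhyme_count := rhymesLoop first_parts second_parts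
      (PySem.List.pyRange 0 ((min first_len second_len : Nat) : Int) 1) 0
  if rhyme_count ≥ 2 then true else false

-- ===== PORT B =====
def rhymes_alt (parts_one : List String) (parts_two : List String) : Bool :=
  decide (2 ≤ parts_one.length) && decide (2 ≤ parts_two.length)
    && (PySem.List.pyGet? parts_one (-1) == PySem.List.pyGet? parts_two (-1))
    && (PySem.List.pyGet? parts_one (-2) == PySem.List.pyGet? parts_two (-2))

-- ===== PRECONDITION & SPEC =====
def Spec_rhymes (parts_one : List String) (parts_two : List String) (out : Bool) : Prop := out = rhymes_alt parts_one parts_two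
instance (parts_one : List String) (parts_two : List String) (out : Bool) : Decidable (Spec_rhymes parts_one parts_two out) := by unfold Spec_rhymes; infer_instance

-- ===== CLAIM (what is proved, stated in full; the proofs are below) =====
def Claim_equal_rhymes : Prop := ∀ (parts_one : List String) (parts_two : List String), Dom_rhymes parts_one parts_two → Spec_rhymes parts_one parts_two (rhymes parts_one parts_two)

-- ===== LEMMAS AND PROOFS =====

-- the counter never decreases
theorem rhymesLoop_mono (fp sp : List String) (idxs : List Int) (rc : Nat) :
    rc ≤ rhymesLoop fp sp idxs rc := by
  induction idxs generalizing rc with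
  | nil => simp [rhymesLoop]
  | cons i rest ih =>
    simp only [rhymesLoop]
    cases h1 : PySem.List.pyGet? fp i with
    | none => cases PySem.List.pyGet? sp i <;> simp
    | some a =>
      cases PySem.List.pyGet? sp i with
      | none => simp
      | some b =>
        by_cases hab : a = b
        · simp only [hab]
          exact le_trans (Nat.le_succ rc) (ih (rc + 1))
        · simp [hab]

theorem pyGet?_neg_one_eq_rev (l : List String) : PySem.List.pyGet? l (-1) = l.reverse[0]? := by
  rw [PySem.List.pyGet?_neg_one]
  cases l.eq_nil_or_concat with
  | inl h => subst h; simp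
  | inr h => obtain ⟨ys, y, rfl⟩ := h; simp

theorem pyGet?_neg_two_eq_rev (l : List String) : PySem.List.pyGet? l (-2) = l.reverse[1]? := by
  by_cases h : 2 ≤ l.length
  · rw [PySem.List.pyGet?_neg_ofNat l 2 (by omega) h]
    rw [List.getElem?_reverse (by omega)]
    congr 1
  · have h1 : PySem.List.pyGet? l (-2) = none := by
      rw [PySem.List.pyGet?_eq_none_iff]
      simp [PySem.Raise.InRange]
      omega
    rw [h1]
    symm; rw [List.getElem?_eq_none_iff]; simp only [List.length_reverse]; omega

-- with at least two indices available, the loop result is ≥ 2 iff the first two comparisons both succeed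
theorem rhymesLoop_ge_two (fp sp : List String) (m : Int) (h2 : 2 ≤ m)
    (hf : 2 ≤ fp.length) (hs : 2 ≤ sp.length) :
    (2 ≤ rhymesLoop fp sp (PySem.List.pyRange 0 m 1) 0) ↔ (fp[0]? = sp[0]? ∧ fp[1]? = sp[1]?) := by
  rw [PySem.List.pyRange_one_cons (by omega), PySem.List.pyRange_one_cons (by omega)]
  obtain ⟨a, fp', rfl⟩ : ∃ a fp', fp = a :: fp' := by
    cases fp with | nil => simp at hf | cons a t => exact ⟨a, t, rfl⟩
  obtain ⟨a', fp'', rfl⟩ : ∃ a' fp'', fp' = a' :: fp'' := by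
    cases fp' with | nil => simp at hf | cons a t => exact ⟨a, t, rfl⟩
  obtain ⟨b, sp', rfl⟩ : ∃ b sp', sp = b :: sp' := by
    cases sp with | nil => simp at hs | cons a t => exact ⟨a, t, rfl⟩
  obtain ⟨b', sp'', rfl⟩ : ∃ b' sp'', sp' = b' :: sp'' := by
    cases sp' with | nil => simp at hs | cons a t => exact ⟨a, t, rfl⟩
  have e0 : (0 : Int) + 1 = ((1 : Nat) : Int) := by norm_num
  simp only [rhymesLoop, PySem.List.pyGet?_zero_cons, e0, PySem.List.pyGet?_natCast]
  simp only [List.getElem?_cons_succ, List.getElem?_cons_zero]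
  by_cases hab : a = b
  · by_cases hab' : a' = b'
    · subst hab; subst hab'
      simp only [and_self, iff_true]
      exact le_trans (by norm_num) (rhymesLoop_mono _ _ _ 2)
    · simp [hab, hab']
  · simp [hab]

-- with fewer than two indices, the loop result stays below 2
theorem rhymesLoop_lt_two (fp sp : List String) (m : Int) (h2 : m < 2) :
    rhymesLoop fp sp (PySem.List.pyRange 0 m 1) 0 < 2 := by
  by_cases h1 : m ≤ 0
  · rw [PySem.List.pyRange_one_eq_nil h1]; simp [rhymesLoop]
  · have hm : m = 1 := by omega
    subst hm
    rw [PySem.List.pyRange_one_cons (by norm_num), PySem.List.pyRange_one_eq_nil (by norm_num)]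
    simp only [rhymesLoop]
    cases PySem.List.pyGet? fp 0 with
    | none => cases PySem.List.pyGet? sp 0 <;> simp
    | some a =>
      cases PySem.List.pyGet? sp 0 with
      | none => simp
      | some b => by_cases hab : a = b <;> simp [hab]

-- ===== VERDICT (by name: the statement is the Claim_ definition above) =====
theorem rhymes_spec : Claim_equal_rhymes := by
  intro p1 p2 _
  unfold Spec_rhymes rhymes rhymes_alt
  simp only []
  rw [pyGet?_neg_one_eq_rev, pyGet?_neg_one_eq_rev, pyGet?_neg_two_eq_rev, pyGet?_neg_two_eq_rev]
  set R := rhymesLoop p1.reverse p2.reverse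
      (PySem.List.pyRange 0 ((min p1.length p2.length : Nat) : Int) 1) 0 with hR
  by_cases h1 : 2 ≤ p1.length
  · by_cases h2 : 2 ≤ p2.length
    · have hm : (2 : Int) ≤ ((min p1.length p2.length : Nat) : Int) := by
        have : 2 ≤ min p1.length p2.length := le_min h1 h2
        exact_mod_cast this
      have hiff := rhymesLoop_ge_two p1.reverse p2.reverse _ hm (by simpa) (by simpa)
      rw [← hR] at hiff
      by_cases hc : 2 ≤ R
      · obtain ⟨e0, e1⟩ := hiff.mp hc
        rw [if_pos hc]
        simp [h1, h2, e0, e1]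
      · rw [if_neg hc]
        have hne : ¬ (p1.reverse[0]? = p2.reverse[0]? ∧ p1.reverse[1]? = p2.reverse[1]?) :=
          fun hcontra => hc (hiff.mpr hcontra)
        rcases not_and_or.mp hne with hne | hne
        · simp [beq_eq_false_iff_ne.mpr hne]
        · simp [beq_eq_false_iff_ne.mpr hne]
    · have hm : ((min p1.length p2.length : Nat) : Int) < 2 := by
        have : min p1.length p2.length < 2 := lt_of_le_of_lt (min_le_right _ _) (by omega)
        exact_mod_cast this
      have hlt := rhymesLoop_lt_two p1.reverse p2.reverse _ hm
      rw [← hR] at hlt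
      rw [if_neg (by omega)]
      simp [h2]
  · have hm : ((min p1.length p2.length : Nat) : Int) < 2 := by
      have : min p1.length p2.length < 2 := lt_of_le_of_lt (min_le_left _ _) (by omega)
      exact_mod_cast this
    have hlt := rhymesLoop_lt_two p1.reverse p2.reverse _ hm
    rw [← hR] at hlt
    rw [if_neg (by omega)]
    simp [h1]
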